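-- pv_equiv track=rewrite | github.com/Gunjeetk/DNA-Pipeline | WCSA_vs_Traditional_DNA_pipeline.py | traditional_score_window
-- ===== SOURCE A (Python) =====
-- def traditional_score_window(candidate_window, read_seq):
--     """Traditional dynamic-programming-like sequence alignment (fixed-length scan)."""
--     score = 0
--     for ref_b, read_b in zip(candidate_window, read_seq):
--         if ref_b == read_b:
--             score += 2
--         else:
--             score -= 1
--     return score
-- ===== SOURCE B (Python) =====
-- def traditional_score_window(candidate_window, read_seq):
--     """Divide-and-conquer: recursively split the compared index range in half and sum the scores."""
--     def go(lo, hi):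
--         if hi <= lo:
--             return 0
--         if hi == lo + 1:
--             return 2 if candidate_window[lo] == read_seq[lo] else -1
--         mid = (lo + hi) // 2
--         return go(lo, mid) + go(mid, hi)
--     return go(0, min(len(candidate_window), len(read_seq)))
-- ===== Notes on version B (the rewrite author's own statement) =====
-- stated objective: alternative
-- what changed: B replaces A's single left-to-right zip scan with a divide-and-conquer recursion that splits the compared index range in half, scores each half independently and sums the results (correct because the score is a sum of independent per-position contributions).
import Mathlib
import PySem

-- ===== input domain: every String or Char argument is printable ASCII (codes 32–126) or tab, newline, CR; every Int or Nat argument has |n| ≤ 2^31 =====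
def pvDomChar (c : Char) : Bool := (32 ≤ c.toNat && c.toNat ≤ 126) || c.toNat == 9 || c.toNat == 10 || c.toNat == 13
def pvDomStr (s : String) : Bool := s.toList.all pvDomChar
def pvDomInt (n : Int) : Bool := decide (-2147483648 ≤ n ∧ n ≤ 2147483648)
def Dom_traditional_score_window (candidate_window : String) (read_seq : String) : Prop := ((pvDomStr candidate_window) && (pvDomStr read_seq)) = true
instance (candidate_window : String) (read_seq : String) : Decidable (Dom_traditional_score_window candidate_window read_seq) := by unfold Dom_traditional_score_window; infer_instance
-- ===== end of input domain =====

-- B scores the window by divide-and-conquer on the index range instead of A's linear zip scan (alternative decomposition; same cost).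

-- ===== PORT A =====
def traditional_score_window (candidate_window : String) (read_seq : String) : Int :=
  (candidate_window.toList.zip read_seq.toList).foldl
    (fun score p => if p.1 = p.2 then score + 2 else score - 1) 0

-- ===== PORT B =====
-- Source B's inner `go(lo, hi)`: score of the index range [lo, hi) by halving it.
def tswGo (la lb : List Char) (lo hi : Nat) : Int :=
  if hi ≤ lo then 0
  else if hi = lo + 1 then (if la.getD lo ' ' = lb.getD lo ' ' then 2 else -1)
  else tswGo la lb lo ((lo + hi) / 2) + tswGo la lb ((lo + hi) / 2) hi
termination_by hi - lo
decreasing_by all_goals omega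

def traditional_score_window_alt (candidate_window : String) (read_seq : String) : Int :=
  tswGo candidate_window.toList read_seq.toList 0
    (min candidate_window.toList.length read_seq.toList.length)

-- ===== PRECONDITION & SPEC =====
def Spec_traditional_score_window (candidate_window : String) (read_seq : String) (out : Int) : Prop := out = traditional_score_window_alt candidate_window read_seq
instance (candidate_window : String) (read_seq : String) (out : Int) : Decidable (Spec_traditional_score_window candidate_window read_seq out) := by unfold Spec_traditional_score_window; infer_instance

-- ===== CLAIM (what is proved, stated in full; the proofs are below) =====
def Claim_equal_traditional_score_window : Prop := ∀ (candidate_window : String) (read_seq : String), Dom_traditional_score_window candidate_window read_seq → Spec_traditional_score_window candidate_window read_seq (traditional_score_window candidate_window read_seq)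

-- ===== LEMMAS AND PROOFS =====
-- per-position contribution, by index
def pvQ (la lb : List Char) (i : Nat) : Int :=
  if la.getD i ' ' = lb.getD i ' ' then 2 else -1

lemma pvQ_cons (a b : Char) (as bs : List Char) (i : Nat) :
    pvQ (a :: as) (b :: bs) (i + 1) = pvQ as bs i := by
  simp [pvQ]

lemma foldA_eq_sum (la lb : List Char) (s : Int) :
    (la.zip lb).foldl (fun score p => if p.1 = p.2 then score + 2 else score - 1) s
      = s + ∑ i ∈ Finset.range (min la.length lb.length), pvQ la lb i := by
  induction la generalizing lb s with
  | nil => simp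
  | cons a as ih =>
    cases lb with
    | nil => simp
    | cons b bs =>
      simp only [List.zip_cons_cons, List.foldl, List.length_cons,
        Nat.succ_min_succ]
      rw [ih]
      rw [Finset.sum_range_succ']
      simp only [pvQ_cons]
      have h0 : pvQ (a :: as) (b :: bs) 0 = if a = b then 2 else -1 := by
        simp [pvQ]
      rw [h0]
      by_cases hab : a = b <;> simp [hab] <;> ring

lemma tswGo_eq_sum (la lb : List Char) (lo hi : Nat) :
    tswGo la lb lo hi = ∑ i ∈ Finset.Ico lo hi, pvQ la lb i := by
  induction lo, hi using tswGo.induct la lb with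
  | case1 lo hi h =>
    rw [tswGo]
    simp [h]
  | case2 lo heq h1 =>
    rw [tswGo, if_neg h1, if_pos rfl, if_pos heq, Nat.Ico_succ_singleton,
      Finset.sum_singleton, pvQ, if_pos heq]
  | case3 lo hne h1 =>
    rw [tswGo, if_neg h1, if_pos rfl, if_neg hne, Nat.Ico_succ_singleton,
      Finset.sum_singleton, pvQ, if_neg hne]
  | case4 lo hi h1 h2 ih1 ih2 =>
    rw [tswGo, if_neg h1, if_neg h2, ih1, ih2, Finset.sum_Ico_consecutive]
    · omega
    · omega

-- ===== VERDICT (by name: the statement is the Claim_ definition above) =====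
theorem traditional_score_window_spec : Claim_equal_traditional_score_window := by
  intro a b _
  unfold Spec_traditional_score_window traditional_score_window traditional_score_window_alt
  rw [foldA_eq_sum, tswGo_eq_sum, Finset.range_eq_Ico]
  simp
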